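-- pv_equiv track=rewrite | github.com/Samm07/Code-Library | alice.py | returnFactors
-- ===== SOURCE A (Python) =====
-- def returnFactors(x):
--     l=[]
--     i=2
--     while i<=x//2:
--         if len(l)==0:
--             if x%i==0:
--                 l.append(i)
--
--         if len(l)==1 and l[0]==2:
--             if x%x//2==0:
--                 l.append(x//2)
--                 return l
--
--         if len(l)==1:
--             if x%i==0 and l[0]*i==x:
--                 l.append(i)
--
--         if len(l)==2:
--             return l
--
--         i+=1
-- ===== SOURCE B (Python) =====
-- def returnFactors(x):
--     # Trial division only up to sqrt(x): the smallest factor p (if any) satisfies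
--     # p*p <= x, and the co-factor is x // p directly.  Same return values as A.
--     if x < 4:
--         return None
--     p = 2
--     while p * p <= x:
--         if x % p == 0:
--             return [p, x // p]
--         p += 1
--     return None
-- ===== Notes on version B (the rewrite author's own statement) =====
-- stated objective: faster
-- what changed: Replaces A's linear scan of every candidate up to half of x (with its three-branch list-state machine that waits for the co-factor to come around) by trial division up to the square root of x, computing the co-factor directly with a single division.
import Mathlib
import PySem

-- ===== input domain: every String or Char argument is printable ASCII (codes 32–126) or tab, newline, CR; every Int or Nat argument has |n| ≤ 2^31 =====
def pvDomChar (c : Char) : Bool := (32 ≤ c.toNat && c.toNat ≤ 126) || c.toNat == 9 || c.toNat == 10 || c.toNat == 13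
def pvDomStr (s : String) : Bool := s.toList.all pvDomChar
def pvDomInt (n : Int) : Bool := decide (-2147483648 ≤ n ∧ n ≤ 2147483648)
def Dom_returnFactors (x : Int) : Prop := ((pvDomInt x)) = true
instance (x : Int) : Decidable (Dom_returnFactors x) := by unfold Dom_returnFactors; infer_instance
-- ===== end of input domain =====

-- B replaces A's scan of all candidates up to half of x by trial division up to the square root,
-- computing the co-factor directly with a single division (objective: faster).

-- ===== PORT A =====
-- literal port of A's while-loop: the mutable state is the list l and the counter i
def pvLoopA (x : Int) (l : List Int) (i : Int) : Option (List Int) :=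
  if hle : i ≤ PySem.Int.floordiv x 2 then
    -- if len(l)==0: if x%i==0: l.append(i)
    let l1 := if l.length = 0 ∧ PySem.Int.mod x i = 0 then l ++ [i] else l
    -- if len(l)==1 and l[0]==2: if x%x//2==0: l.append(x//2); return l
    if l1.length = 1 ∧ l1.headI = 2 ∧ PySem.Int.floordiv (PySem.Int.mod x x) 2 = 0 then
      some (l1 ++ [PySem.Int.floordiv x 2])
    else
      -- if len(l)==1: if x%i==0 and l[0]*i==x: l.append(i)
      let l2 := if l1.length = 1 ∧ PySem.Int.mod x i = 0 ∧ l1.headI * i = x then l1 ++ [i] else l1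
      -- if len(l)==2: return l
      if l2.length = 2 then some l2 else pvLoopA x l2 (i + 1)
  else none
termination_by (PySem.Int.floordiv x 2 + 1 - i).toNat
decreasing_by omega

def returnFactors (x : Int) : Option (List Int) := pvLoopA x [] 2

-- ===== PORT B =====
def pvLoopB (x p : Int) : Option (List Int) :=
  if hp : p * p ≤ x then
    if PySem.Int.mod x p = 0 then some [p, PySem.Int.floordiv x p]
    else pvLoopB x (p + 1)
  else none
termination_by (x + 1 - p).toNat
decreasing_by
  have hpx : p ≤ x := by
    by_cases h1 : 1 ≤ p
    · nlinarith [mul_nonneg (by linarith : (0:Int) ≤ p - 1) (by linarith : (0:Int) ≤ p)]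
    · push_neg at h1
      nlinarith [mul_self_nonneg p]
  omega

def returnFactors_alt (x : Int) : Option (List Int) :=
  if x < 4 then none else pvLoopB x 2

-- ===== PRECONDITION & SPEC =====
def Spec_returnFactors (x : Int) (out : Option (List Int)) : Prop := out = returnFactors_alt x
instance (x : Int) (out : Option (List Int)) : Decidable (Spec_returnFactors x out) := by unfold Spec_returnFactors; infer_instance

-- ===== CLAIM (what is proved, stated in full; the proofs are below) =====
def Claim_equal_returnFactors : Prop := ∀ (x : Int), Dom_returnFactors x → Spec_returnFactors x (returnFactors x)

-- ===== LEMMAS AND PROOFS =====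

-- A's loop with empty list returns none when no divisor of x lies in [2, x//2]
theorem pvLoopA_none (x : Int)
    (hno : ∀ q : Int, 2 ≤ q → q ≤ PySem.Int.floordiv x 2 → ¬ q ∣ x) :
    ∀ i : Int, 2 ≤ i → pvLoopA x [] i = none := by
  have H : ∀ n : Nat, ∀ i : Int, 2 ≤ i →
      (PySem.Int.floordiv x 2 + 1 - i).toNat ≤ n → pvLoopA x [] i = none := by
    intro n
    induction n with
    | zero =>
      intro i h2 hn
      rw [pvLoopA, dif_neg (by omega)]
    | succ n ih =>
      intro i h2 hn
      rw [pvLoopA]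
      by_cases hle : i ≤ PySem.Int.floordiv x 2
      · have hmod : ¬ PySem.Int.mod x i = 0 := by
          rw [PySem.Int.mod_eq_zero_iff_dvd]; exact hno i h2 hle
        rw [dif_pos hle]
        simp only [List.length_nil]
        simp [hmod]
        exact ih (i + 1) (by omega) (by omega)
      · rw [dif_neg hle]
  intro i h2
  exact H (PySem.Int.floordiv x 2 + 1 - i).toNat i h2 le_rfl

-- A's loop with empty list skips every i below the smallest divisor d
theorem pvLoopA_phase1 (x d : Int) (hdle : d ≤ PySem.Int.floordiv x 2)
    (hmin : ∀ q : Int, 2 ≤ q → q < d → ¬ q ∣ x) :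
    ∀ i : Int, 2 ≤ i → i ≤ d → pvLoopA x [] i = pvLoopA x [] d := by
  have H : ∀ n : Nat, ∀ i : Int, 2 ≤ i → i ≤ d → (d - i).toNat ≤ n →
      pvLoopA x [] i = pvLoopA x [] d := by
    intro n
    induction n with
    | zero =>
      intro i h2 hid hn
      obtain rfl : i = d := by omega
      rfl
    | succ n ih =>
      intro i h2 hid hn
      rcases eq_or_lt_of_le hid with rfl | hlt
      · rfl
      · have hle : i ≤ PySem.Int.floordiv x 2 := by omega
        have hmod : ¬ PySem.Int.mod x i = 0 := by
          rw [PySem.Int.mod_eq_zero_iff_dvd]; exact hmin i h2 hlt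
        rw [pvLoopA, dif_pos hle]
        simp [hmod]
        exact ih (i + 1) (by omega) (by omega) (by omega)
  intro i h2 hid
  exact H (d - i).toNat i h2 hid le_rfl

-- A's loop with state [d] (d ≥ 3, d*c = x) returns [d, c] once i reaches the co-factor c
theorem pvLoopA_phase2 (x d c : Int) (hd3 : 3 ≤ d) (hc2 : 2 ≤ c) (hdc : d * c = x) :
    ∀ i : Int, d < i → i ≤ c → pvLoopA x [d] i = some [d, c] := by
  have hdne2 : d ≠ 2 := by omega
  have hcle : c ≤ PySem.Int.floordiv x 2 := by
    rw [PySem.Int.le_floordiv_iff_mul_le (by norm_num : (0:Int) < 2)]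
    nlinarith [mul_nonneg (by linarith : (0:Int) ≤ d - 2) (by linarith : (0:Int) ≤ c)]
  have hit : pvLoopA x [d] c = some [d, c] := by
    have hmodc : PySem.Int.mod x c = 0 := by
      rw [PySem.Int.mod_eq_zero_iff_dvd]
      exact ⟨d, by rw [← hdc]; ring⟩
    rw [pvLoopA, dif_pos hcle]
    simp [hmodc, hdne2, hdc]
  have H : ∀ n : Nat, ∀ i : Int, d < i → i ≤ c → (c - i).toNat ≤ n →
      pvLoopA x [d] i = some [d, c] := by
    intro n
    induction n with
    | zero =>
      intro i hdi hic hn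
      obtain rfl : i = c := by omega
      exact hit
    | succ n ih =>
      intro i hdi hic hn
      by_cases hic2 : i = c
      · subst hic2; exact hit
      · have hltc : i < c := by omega
        have hle : i ≤ PySem.Int.floordiv x 2 := by omega
        have hlt2 : d * i < x := by
          rw [← hdc]
          exact mul_lt_mul_of_pos_left hltc (by omega)
        have hne : d * i ≠ x := ne_of_lt hlt2
        rw [pvLoopA, dif_pos hle]
        simp [hne, hdne2]
        exact ih (i + 1) (by omega) (by omega) (by omega)
  intro i hdi hic
  exact H (c - i).toNat i hdi hic le_rfl

-- the step of A's loop at i = d, the smallest (odd) divisor: it returns [d, x//d]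
theorem pvLoopA_at_d (x d : Int) (hd3 : 3 ≤ d) (hdvd : d ∣ x) (hsq : d * d ≤ x) :
    pvLoopA x [] d = some [d, PySem.Int.floordiv x d] := by
  have hd0 : (0:Int) < d := by omega
  have hdne2 : d ≠ 2 := by omega
  set c := PySem.Int.floordiv x d with hc
  have hcdef : c = x / d := by rw [hc, PySem.Int.floordiv_eq_ediv_of_pos hd0]
  have hdc : d * c = x := by rw [hcdef]; exact Int.mul_ediv_cancel' hdvd
  have hmul : d * d ≤ d * c := by rw [hdc]; exact hsq
  have hdlec : d ≤ c := le_of_mul_le_mul_left hmul hd0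
  have hc2 : 2 ≤ c := by omega
  have hdle : d ≤ PySem.Int.floordiv x 2 := by
    rw [PySem.Int.le_floordiv_iff_mul_le (by norm_num : (0:Int) < 2)]
    nlinarith [mul_nonneg (by linarith : (0:Int) ≤ d - 2) (by linarith : (0:Int) ≤ d)]
  have hmodd : PySem.Int.mod x d = 0 := by
    rw [PySem.Int.mod_eq_zero_iff_dvd]; exact hdvd
  rw [pvLoopA, dif_pos hdle]
  by_cases hsqeq : d * d = x
  · have hcd : c = d := mul_left_cancel₀ (by omega : d ≠ 0) (by rw [hdc, ← hsqeq])
    simp [hmodd, hdne2, hsqeq, hcd]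
  · have hcdne : d ≠ c := by
      intro h
      rw [← h] at hdc
      exact hsqeq hdc
    have hdltc : d < c := lt_of_le_of_ne hdlec hcdne
    simp [hmodd, hdne2, hsqeq]
    exact pvLoopA_phase2 x d c hd3 hc2 hdc (d + 1) (by omega) (by omega)

-- B's loop returns none when no divisor of x has square ≤ x
theorem pvLoopB_none (x : Int)
    (hno : ∀ q : Int, 2 ≤ q → q * q ≤ x → ¬ q ∣ x) :
    ∀ p : Int, 2 ≤ p → pvLoopB x p = none := by
  have H : ∀ n : Nat, ∀ p : Int, 2 ≤ p → (x + 1 - p).toNat ≤ n → pvLoopB x p = none := by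
    intro n
    induction n with
    | zero =>
      intro p h2 hn
      have hxp : x < p := by omega
      rw [pvLoopB, dif_neg (by nlinarith)]
    | succ n ih =>
      intro p h2 hn
      rw [pvLoopB]
      by_cases hsq : p * p ≤ x
      · have hmod : ¬ PySem.Int.mod x p = 0 := by
          rw [PySem.Int.mod_eq_zero_iff_dvd]; exact hno p h2 hsq
        rw [dif_pos hsq, if_neg hmod]
        exact ih (p + 1) (by omega) (by omega)
      · rw [dif_neg hsq]
  intro p h2
  exact H (x + 1 - p).toNat p h2 le_rfl

-- B's loop skips every p below the smallest divisor d
theorem pvLoopB_phase1 (x d : Int) (hsq : d * d ≤ x)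
    (hmin : ∀ q : Int, 2 ≤ q → q < d → ¬ q ∣ x) :
    ∀ p : Int, 2 ≤ p → p ≤ d → pvLoopB x p = pvLoopB x d := by
  have H : ∀ n : Nat, ∀ p : Int, 2 ≤ p → p ≤ d → (d - p).toNat ≤ n →
      pvLoopB x p = pvLoopB x d := by
    intro n
    induction n with
    | zero =>
      intro p h2 hpd hn
      obtain rfl : p = d := by omega
      rfl
    | succ n ih =>
      intro p h2 hpd hn
      rcases eq_or_lt_of_le hpd with rfl | hlt
      · rfl
      · have hsqp : p * p ≤ x := by
          nlinarith [mul_nonneg (by linarith : (0:Int) ≤ d - p) (by linarith : (0:Int) ≤ d + p)]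
        have hmod : ¬ PySem.Int.mod x p = 0 := by
          rw [PySem.Int.mod_eq_zero_iff_dvd]; exact hmin p h2 hlt
        rw [pvLoopB, dif_pos hsqp, if_neg hmod]
        exact ih (p + 1) (by omega) (by omega) (by omega)
  intro p h2 hpd
  exact H (d - p).toNat p h2 hpd le_rfl

-- the step of B's loop at the smallest divisor d
theorem pvLoopB_at_d (x d : Int) (hsq : d * d ≤ x) (hdvd : d ∣ x) :
    pvLoopB x d = some [d, PySem.Int.floordiv x d] := by
  rw [pvLoopB, dif_pos hsq,
    if_pos (by rw [PySem.Int.mod_eq_zero_iff_dvd]; exact hdvd)]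

-- the equivalence itself
theorem returnFactors_eq (x : Int) : returnFactors x = returnFactors_alt x := by
  unfold returnFactors returnFactors_alt
  by_cases h4 : x < 4
  · have hne : ¬ (2 ≤ PySem.Int.floordiv x 2) := by
      rw [not_le, PySem.Int.floordiv_lt_iff_lt_mul (by norm_num : (0:Int) < 2)]
      omega
    rw [if_pos h4, pvLoopA, dif_neg hne]
  · push_neg at h4
    rw [if_neg (by omega : ¬ x < 4)]
    by_cases h2 : (2:Int) ∣ x
    · -- even x ≥ 4: both return [2, x//2] immediately
      have hle : (2:Int) ≤ PySem.Int.floordiv x 2 := by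
        rw [PySem.Int.le_floordiv_iff_mul_le (by norm_num : (0:Int) < 2)]
        omega
      have hmod2 : PySem.Int.mod x 2 = 0 := by
        rw [PySem.Int.mod_eq_zero_iff_dvd]; exact h2
      have hmodxx : PySem.Int.mod x x = 0 := by
        rw [PySem.Int.mod_eq_zero_iff_dvd]
      have h02 : PySem.Int.floordiv (0:Int) 2 = 0 := by decide
      rw [pvLoopA, dif_pos hle, pvLoopB, dif_pos (by omega : (2:Int) * 2 ≤ x), if_pos hmod2]
      simp [hmodxx, h2]
    · by_cases hcomp : ∃ q : Int, 2 ≤ q ∧ q ∣ x ∧ q * q ≤ x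
      · -- odd composite x: both return [d, x//d] for the smallest divisor d
        obtain ⟨q, hq2, hqdvd, hqsq⟩ := hcomp
        have hxt : ((x.toNat : Int)) = x := Int.toNat_of_nonneg (by omega)
        have hne1 : x.toNat ≠ 1 := by omega
        have hprime : Nat.Prime x.toNat.minFac := Nat.minFac_prime hne1
        have hd2 : (2:Int) ≤ (x.toNat.minFac : Int) := by exact_mod_cast hprime.two_le
        have hddvd : ((x.toNat.minFac : Int)) ∣ x := by
          have h := Int.natCast_dvd_natCast.mpr (Nat.minFac_dvd x.toNat)
          rwa [hxt] at h
        have hmin : ∀ r : Int, 2 ≤ r → r ∣ x → ((x.toNat.minFac : Int)) ≤ r := by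
          intro r hr2 hrdvd
          have h1 : ((r.toNat : Int)) = r := Int.toNat_of_nonneg (by omega)
          have hrt : r.toNat ∣ x.toNat := by
            rw [← Int.natCast_dvd_natCast, h1, hxt]; exact hrdvd
          have h3 := Nat.minFac_le_of_dvd (by omega) hrt
          omega
        have hdne2 : ((x.toNat.minFac : Int)) ≠ 2 := by
          intro h; rw [h] at hddvd; exact h2 hddvd
        have hd3 : (3:Int) ≤ (x.toNat.minFac : Int) := by omega
        have hdsq : ((x.toNat.minFac : Int)) * (x.toNat.minFac : Int) ≤ x := by
          have hdq : ((x.toNat.minFac : Int)) ≤ q := hmin q hq2 hqdvd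
          nlinarith [mul_nonneg (by linarith : (0:Int) ≤ q - (x.toNat.minFac : Int))
            (by linarith : (0:Int) ≤ q + (x.toNat.minFac : Int))]
        have hmin' : ∀ r : Int, 2 ≤ r → r < (x.toNat.minFac : Int) → ¬ r ∣ x :=
          fun r hr2 hrlt hrdvd => absurd (hmin r hr2 hrdvd) (by omega)
        have hdle : ((x.toNat.minFac : Int)) ≤ PySem.Int.floordiv x 2 := by
          rw [PySem.Int.le_floordiv_iff_mul_le (by norm_num : (0:Int) < 2)]
          nlinarith [mul_nonneg (by linarith : (0:Int) ≤ (x.toNat.minFac : Int) - 2)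
            (by linarith : (0:Int) ≤ (x.toNat.minFac : Int))]
        have hA : pvLoopA x [] 2 = some [(x.toNat.minFac : Int), PySem.Int.floordiv x (x.toNat.minFac : Int)] := by
          rw [pvLoopA_phase1 x (x.toNat.minFac : Int) hdle hmin' 2 (by norm_num) hd2]
          exact pvLoopA_at_d x _ hd3 hddvd hdsq
        have hB : pvLoopB x 2 = some [(x.toNat.minFac : Int), PySem.Int.floordiv x (x.toNat.minFac : Int)] := by
          rw [pvLoopB_phase1 x (x.toNat.minFac : Int) hdsq hmin' 2 (by norm_num) hd2]
          exact pvLoopB_at_d x _ hdsq hddvd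
        rw [hA, hB]
      · -- x ≥ 4 with no divisor of square ≤ x (odd prime): both return none
        push_neg at hcomp
        have hA : pvLoopA x [] 2 = none := by
          refine pvLoopA_none x ?_ 2 (by norm_num)
          intro r hr2 hrle hrdvd
          rw [PySem.Int.le_floordiv_iff_mul_le (by norm_num : (0:Int) < 2)] at hrle
          have hxr := hcomp r hr2 hrdvd
          obtain ⟨k, hk⟩ := hrdvd
          have hk2 : 2 ≤ k := by
            by_contra hlt
            push_neg at hlt
            nlinarith [mul_pos (by linarith : (0:Int) < 2 - k) (by linarith : (0:Int) < r)]
          have hkdvd : k ∣ x := ⟨r, by rw [hk]; ring⟩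
          have hxk := hcomp k hk2 hkdvd
          have hk' : x = k * r := by rw [hk]; ring
          have hlt1 : k < r := lt_of_mul_lt_mul_left (hk ▸ hxr) (by omega : (0:Int) ≤ r)
          have hlt2 : r < k := lt_of_mul_lt_mul_left (hk' ▸ hxk) (by omega : (0:Int) ≤ k)
          omega
        have hB : pvLoopB x 2 = none := by
          refine pvLoopB_none x ?_ 2 (by norm_num)
          intro r hr2 hrsq hrdvd
          exact absurd hrsq (not_le.mpr (hcomp r hr2 hrdvd))
        rw [hA, hB]

-- ===== VERDICT (by name: the statement is the Claim_ definition above) =====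
theorem returnFactors_spec : Claim_equal_returnFactors := by
  intro x _hdom
  exact returnFactors_eq x
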